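-- pv_equiv track=rewrite | github.com/eunsu-park/study-hub | examples/Formal_Languages/04_pumping_lemma.py | is_anbncn
-- ===== SOURCE A (Python) =====
-- def is_anbncn(s: str) -> bool:
--     """Check if s is in {a^n b^n c^n | n >= 0}."""
--     if not s:
--         return True
--     i = 0
--     while i < len(s) and s[i] == 'a':
--         i += 1
--     na = i
--     while i < len(s) and s[i] == 'b':
--         i += 1
--     nb = i - na
--     while i < len(s) and s[i] == 'c':
--         i += 1
--     nc = i - na - nb
--     return i == len(s) and na == nb == nc and na > 0
-- ===== SOURCE B (Python) =====
-- def is_anbncn(s: str) -> bool: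
--     n = len(s) // 3
--     return s == 'a' * n + 'b' * n + 'c' * n
-- ===== Notes on version B (the rewrite author's own statement) =====
-- stated objective: simpler
-- what changed: Replaces the three index-based scanning while-loops and count comparisons with a single construct-and-compare: build the canonical string a^n b^n c^n for n = len(s)//3 and test equality.
import Mathlib
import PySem

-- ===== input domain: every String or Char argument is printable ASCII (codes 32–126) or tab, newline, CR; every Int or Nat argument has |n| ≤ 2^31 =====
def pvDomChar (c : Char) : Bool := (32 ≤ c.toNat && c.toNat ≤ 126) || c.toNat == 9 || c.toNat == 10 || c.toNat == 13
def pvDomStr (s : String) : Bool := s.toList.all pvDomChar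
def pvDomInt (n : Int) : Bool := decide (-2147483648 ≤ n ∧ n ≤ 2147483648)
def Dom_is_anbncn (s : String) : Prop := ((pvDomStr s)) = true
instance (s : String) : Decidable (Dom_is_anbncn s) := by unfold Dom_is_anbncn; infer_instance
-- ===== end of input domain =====

-- B replaces A's three scanning while-loops with construct-and-compare against the canonical a^n b^n c^n; objective: simpler.

-- ===== PORT A =====
-- A's while loop 'while i < len(s) and s[i] == c: i += 1' starting at the current
-- position: number of leading occurrences of c in the remaining list.
def pvScanWhile (c : Char) : List Char → Nat
  | [] => 0
  | x :: xs => if x = c then pvScanWhile c xs + 1 else 0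

def is_anbncn (s : String) : Bool :=
  let l := s.toList
  if l = [] then true
  else
    let na := pvScanWhile 'a' l
    let rest1 := l.drop na
    let nb := pvScanWhile 'b' rest1
    let rest2 := rest1.drop nb
    let nc := pvScanWhile 'c' rest2
    let i := na + nb + nc
    decide (i = l.length ∧ na = nb ∧ nb = nc ∧ na > 0)

-- ===== PORT B =====
def is_anbncn_alt (s : String) : Bool :=
  let n := s.toList.length / 3
  decide (s.toList = List.replicate n 'a' ++ List.replicate n 'b' ++ List.replicate n 'c')

-- ===== PRECONDITION & SPEC =====
def Spec_is_anbncn (s : String) (out : Bool) : Prop := out = is_anbncn_alt s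
instance (s : String) (out : Bool) : Decidable (Spec_is_anbncn s out) := by unfold Spec_is_anbncn; infer_instance

-- ===== CLAIM (what is proved, stated in full; the proofs are below) =====
def Claim_equal_is_anbncn : Prop := ∀ (s : String), Dom_is_anbncn s → Spec_is_anbncn s (is_anbncn s)

-- ===== LEMMAS AND PROOFS =====

theorem pvScanWhile_le (c : Char) (l : List Char) : pvScanWhile c l ≤ l.length := by
  induction l with
  | nil => simp [pvScanWhile]
  | cons x xs ih =>
    simp only [pvScanWhile, List.length_cons]
    split <;> omega

theorem take_pvScanWhile (c : Char) (l : List Char) :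
    l.take (pvScanWhile c l) = List.replicate (pvScanWhile c l) c := by
  induction l with
  | nil => simp [pvScanWhile]
  | cons x xs ih =>
    simp only [pvScanWhile]
    split
    · next h => simp [h, List.replicate_succ, ih]
    · simp

theorem pvScanWhile_replicate_append (c : Char) (n : Nat) (ys : List Char)
    (h : ys.head? ≠ some c) :
    pvScanWhile c (List.replicate n c ++ ys) = n := by
  induction n with
  | zero =>
    simp only [List.replicate, List.nil_append]
    cases ys with
    | nil => simp [pvScanWhile]
    | cons y ys' =>
      simp only [List.head?] at h
      simp only [pvScanWhile]
      rw [if_neg (by intro hy; exact h (by rw [hy]))]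
  | succ k ih =>
    simp [List.replicate_succ, pvScanWhile, ih]

-- core: on any character list, A's scan-based test agrees with B's construct-and-compare
theorem is_anbncn_alt_eq (s : String) : is_anbncn s = is_anbncn_alt s := by
  unfold is_anbncn is_anbncn_alt
  generalize s.toList = l
  by_cases hnil : l = []
  · simp [hnil]
  · rw [Bool.eq_iff_iff]
    simp only [if_neg hnil, decide_eq_true_eq]
    constructor
    · rintro ⟨hi, hab, hbc, hpos⟩
      set na := pvScanWhile 'a' l with hna
      set nb := pvScanWhile 'b' (l.drop na) with hnb
      set nc := pvScanWhile 'c' ((l.drop na).drop nb) with hnc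
      have hle1 : na ≤ l.length := hna ▸ pvScanWhile_le 'a' l
      have hle2 : nb ≤ (l.drop na).length := hnb ▸ pvScanWhile_le 'b' _
      have h1 : l.take na = List.replicate na 'a' := hna ▸ take_pvScanWhile 'a' l
      have h2 : (l.drop na).take nb = List.replicate nb 'b' := hnb ▸ take_pvScanWhile 'b' _
      have h3 : ((l.drop na).drop nb).take nc = List.replicate nc 'c' := hnc ▸ take_pvScanWhile 'c' _
      have hlen2 : ((l.drop na).drop nb).length = nc := by
        simp only [List.length_drop] at *
        omega
      have h3' : (l.drop na).drop nb = List.replicate nc 'c' := by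
        rw [← List.take_of_length_le (le_of_eq hlen2), h3]
      have h2' : l.drop na = List.replicate nb 'b' ++ List.replicate nc 'c' := by
        conv_lhs => rw [← List.take_append_drop nb (l.drop na)]
        rw [h2, h3']
      have hmain : l = List.replicate na 'a' ++ List.replicate nb 'b' ++ List.replicate nc 'c' := by
        conv_lhs => rw [← List.take_append_drop na l]
        rw [h1, h2', List.append_assoc]
      have hL : l.length = 3 * na := by
        rw [hmain]
        simp only [List.length_append, List.length_replicate]
        omega
      have hdiv : l.length / 3 = na := by omega
      rw [hdiv, hmain, ← hab, ← hbc, ← hab]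
    · intro h
      set n := l.length / 3 with hn
      clear_value n
      have hlen : l.length = n + n + n := by rw [h]; simp; omega
      have hne : l.length ≠ 0 := by simpa using hnil
      have hpos : 0 < n := by omega
      have hA : pvScanWhile 'a' l = n := by
        rw [h, List.append_assoc]
        exact pvScanWhile_replicate_append _ _ _
          (by cases n with
              | zero => omega
              | succ k => simp [List.replicate_succ])
      have hdA : l.drop n = List.replicate n 'b' ++ List.replicate n 'c' := by
        rw [h, List.append_assoc, List.drop_append_of_le_length (by simp), List.drop_replicate]
        simp
      have hB : pvScanWhile 'b' (l.drop n) = n := by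
        rw [hdA]
        exact pvScanWhile_replicate_append _ _ _
          (by cases n with
              | zero => omega
              | succ k => simp [List.replicate_succ])
      have hdB : (l.drop n).drop n = List.replicate n 'c' := by
        rw [hdA, List.drop_append_of_le_length (by simp), List.drop_replicate]
        simp
      have hC : pvScanWhile 'c' ((l.drop n).drop n) = n := by
        rw [hdB]
        simpa using pvScanWhile_replicate_append 'c' n [] (by simp)
      rw [hA, hB, hC]
      exact ⟨by omega, rfl, rfl, hpos⟩

-- ===== VERDICT (by name: the statement is the Claim_ definition above) =====
theorem is_anbncn_spec : Claim_equal_is_anbncn := by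
  intro s _
  unfold Spec_is_anbncn
  exact is_anbncn_alt_eq s
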